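-- pv_equiv track=rewrite | github.com/changhae89/costview_LLM | backend/api/routes/mobile.py | _nth_non_null_value
-- ===== SOURCE A (Python) =====
-- def _nth_non_null_value(rows: list[dict], key: str, nth: int = 0):
--     seen = 0
--     for row in reversed(rows):
--         value = row.get(key)
--         if value is None or value == "":
--             continue
--         if seen == nth:
--             return value
--         seen += 1
--     return None
-- ===== SOURCE B (Python) =====
-- def _nth_non_null_value(rows: list[dict], key: str, nth: int = 0):
--     # Single FORWARD pass keeping a sliding buffer of the last nth+1 kept
--     # values; the nth-from-end is the buffer's head once it is full.
--     if nth < 0: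
--         return None
--     buf = []
--     for row in rows:
--         v = row.get(key)
--         if v is not None and v != "":
--             buf.append(v)
--             if len(buf) > nth + 1:
--                 buf.pop(0)
--     return buf[0] if len(buf) == nth + 1 else None
-- ===== Notes on version B (the rewrite author's own statement) =====
-- stated objective: alternative
-- what changed: Replaces A's reverse-order counting scan with a single forward pass that maintains a bounded sliding buffer of the last nth+1 non-null/non-empty values and returns the buffer's head when the buffer is full.
import Mathlib
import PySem

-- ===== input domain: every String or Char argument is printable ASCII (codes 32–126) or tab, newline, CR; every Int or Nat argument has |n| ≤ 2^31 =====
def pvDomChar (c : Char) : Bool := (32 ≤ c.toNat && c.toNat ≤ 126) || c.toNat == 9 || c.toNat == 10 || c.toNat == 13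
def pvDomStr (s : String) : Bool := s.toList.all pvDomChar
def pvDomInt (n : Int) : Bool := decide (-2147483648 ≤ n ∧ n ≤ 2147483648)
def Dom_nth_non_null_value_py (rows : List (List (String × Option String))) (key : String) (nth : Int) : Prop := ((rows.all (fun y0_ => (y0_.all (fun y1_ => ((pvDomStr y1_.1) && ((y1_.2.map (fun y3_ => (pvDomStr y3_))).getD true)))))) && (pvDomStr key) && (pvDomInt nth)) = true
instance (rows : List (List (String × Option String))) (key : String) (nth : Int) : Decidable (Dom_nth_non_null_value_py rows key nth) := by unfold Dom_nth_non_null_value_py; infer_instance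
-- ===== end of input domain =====

-- B replaces A's reverse-order counting scan with a single forward pass over rows
-- keeping a bounded sliding buffer of the last nth+1 kept values (objective: alternative).
-- ===== PORT A =====
-- row.get(key): first-match association-list lookup; a stored None and a missing key both give none
def pvRowGet (row : List (String × Option String)) (key : String) : Option String :=
  match row with
  | [] => none
  | (k, v) :: rest => if k == key then v else pvRowGet rest key

-- literal transliteration of A: scan reversed rows with a 'seen' counter, early return
def pvGoA (l : List (List (String × Option String))) (key : String) (nth seen : Int) : Option String :=
  match l with
  | [] => none
  | row :: rest =>
    match pvRowGet row key with
    | none => pvGoA rest key nth seen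
    | some v =>
      if v = "" then pvGoA rest key nth seen
      else if seen = nth then some v
      else pvGoA rest key nth (seen + 1)

def nth_non_null_value_py (rows : List (List (String × Option String))) (key : String) (nth : Int) : Option String :=
  pvGoA rows.reverse key nth 0

-- ===== PORT B =====
-- one loop iteration of B: append the kept value, pop(0) if the buffer exceeds nth+1.
-- buf.pop(0) on the nonempty buffer removes the head = List.tail (exact here: buf' ≠ []).
def pvStepB (nth : Int) (key : String) (buf : List String) (row : List (String × Option String)) : List String :=
  match pvRowGet row key with
  | none => buf
  | some v =>
    if v = "" then buf
    else
      let buf' := buf ++ [v]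
      if (buf'.length : Int) > nth + 1 then buf'.tail else buf'

-- transliteration of B: forward fold with the sliding buffer, then the final check
def nth_non_null_value_py_alt (rows : List (List (String × Option String))) (key : String) (nth : Int) : Option String :=
  if nth < 0 then none
  else
    let buf := rows.foldl (pvStepB nth key) []
    if (buf.length : Int) = nth + 1 then buf[0]? else none

-- ===== PRECONDITION & SPEC =====
def Spec_nth_non_null_value_py (rows : List (List (String × Option String))) (key : String) (nth : Int) (out : Option String) : Prop := out = nth_non_null_value_py_alt rows key nth
instance (rows : List (List (String × Option String))) (key : String) (nth : Int) (out : Option String) : Decidable (Spec_nth_non_null_value_py rows key nth out) := by unfold Spec_nth_non_null_value_py; infer_instance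

-- ===== CLAIM (what is proved, stated in full; the proofs are below) =====
def Claim_equal_nth_non_null_value_py : Prop := ∀ (rows : List (List (String × Option String))) (key : String) (nth : Int), Dom_nth_non_null_value_py rows key nth → Spec_nth_non_null_value_py rows key nth (nth_non_null_value_py rows key nth)

-- ===== LEMMAS AND PROOFS =====
-- the values A and B both keep, in forward row order
def pvFilt (l : List (List (String × Option String))) (key : String) : List String :=
  l.filterMap (fun row =>
    match pvRowGet row key with
    | none => none
    | some v => if v = "" then none else some v)

-- the last k elements of a list
def pvTk (k : Nat) (xs : List String) : List String := xs.drop (xs.length - k)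

lemma pvTk_cons (k : Nat) (a : String) (l : List String) (h : k ≤ l.length) :
    pvTk k (a :: l) = pvTk k l := by
  unfold pvTk
  have : l.length + 1 - k = (l.length - k) + 1 := by omega
  simp [this]

-- A's scan computes indexing into the filtered list
lemma pvGoA_eq (l : List (List (String × Option String))) (key : String) (nth seen : Int) :
    pvGoA l key nth seen =
      if seen ≤ nth then (pvFilt l key)[(nth - seen).toNat]? else none := by
  induction l generalizing seen with
  | nil => simp [pvGoA, pvFilt]
  | cons row rest ih =>
    simp only [pvGoA, pvFilt, List.filterMap_cons]
    cases h : pvRowGet row key with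
    | none => simpa [pvFilt] using ih seen
    | some v =>
      by_cases hv : v = ""
      · simpa [hv, pvFilt] using ih seen
      · simp only [hv]
        by_cases hs : seen = nth
        · subst hs
          simp
        · rw [ih (seen + 1)]
          simp only [pvFilt]
          by_cases hle : seen ≤ nth
          · have h1 : seen + 1 ≤ nth := by omega
            have h2 : (nth - seen).toNat = (nth - (seen + 1)).toNat + 1 := by omega
            simp [hs, hle, h1, h2]
          · have h1 : ¬ seen + 1 ≤ nth := by omega
            simp [hs, hle, h1]

-- B's fold keeps exactly the last nth+1 filtered values
lemma foldl_stepB (key : String) (nth : Int) (hnth : 0 ≤ nth)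
    (l : List (List (String × Option String))) (buf : List String)
    (hbuf : buf.length ≤ nth.toNat + 1) :
    l.foldl (pvStepB nth key) buf = pvTk (nth.toNat + 1) (buf ++ pvFilt l key) := by
  induction l generalizing buf with
  | nil =>
    simp only [List.foldl_nil, pvFilt, List.filterMap_nil, List.append_nil, pvTk]
    have : buf.length - (nth.toNat + 1) = 0 := by omega
    simp [this]
  | cons row rest ih =>
    rw [List.foldl_cons]
    cases h : pvRowGet row key with
    | none =>
      have hf : pvFilt (row :: rest) key = pvFilt rest key := by
        simp [pvFilt, List.filterMap_cons, h]
      rw [show pvStepB nth key buf row = buf from by simp [pvStepB, h], ih buf hbuf, hf]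
    | some v =>
      by_cases hv : v = ""
      · have hf : pvFilt (row :: rest) key = pvFilt rest key := by
          simp [pvFilt, List.filterMap_cons, h, hv]
        rw [show pvStepB nth key buf row = buf from by simp [pvStepB, h, hv], ih buf hbuf, hf]
      · have hf : pvFilt (row :: rest) key = v :: pvFilt rest key := by
          simp [pvFilt, List.filterMap_cons, h, hv]
        by_cases hlen : ((buf ++ [v]).length : Int) > nth + 1
        · have hstep : pvStepB nth key buf row = (buf ++ [v]).tail := by
            simp only [pvStepB, h, if_neg hv]
            rw [if_pos hlen]
          have hbe : buf.length = nth.toNat + 1 := by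
            have hx : ((buf.length : Int)) + 1 > nth + 1 := by
              have := hlen; simp at this; omega
            omega
          obtain ⟨a, zs, rfl⟩ : ∃ a zs, buf = a :: zs := by
            cases buf with
            | nil => simp at hbe
            | cons a zs => exact ⟨a, zs, rfl⟩
          have htail : ((a :: zs) ++ [v]).tail = zs ++ [v] := rfl
          have hzlen : (zs ++ [v]).length ≤ nth.toNat + 1 := by
            simp at hbe ⊢; omega
          rw [hstep, htail, ih (zs ++ [v]) hzlen, hf]
          have hassoc : (a :: zs) ++ (v :: pvFilt rest key)
              = a :: (zs ++ [v] ++ pvFilt rest key) := by simp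
          rw [hassoc, pvTk_cons]
          simp at hbe ⊢; omega
        · have hstep : pvStepB nth key buf row = buf ++ [v] := by
            simp only [pvStepB, h, if_neg hv]
            rw [if_neg hlen]
          have hble : (buf ++ [v]).length ≤ nth.toNat + 1 := by
            simp at hlen ⊢; omega
          rw [hstep, ih (buf ++ [v]) hble, hf]
          simp [List.append_assoc]

-- ===== VERDICT (by name: the statement is the Claim_ definition above) =====
theorem nth_non_null_value_py_spec : Claim_equal_nth_non_null_value_py := by
  intro rows key nth _
  unfold Spec_nth_non_null_value_py nth_non_null_value_py nth_non_null_value_py_alt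
  rw [pvGoA_eq]
  have hrev : pvFilt rows.reverse key = (pvFilt rows key).reverse := by
    simp [pvFilt, List.filterMap_reverse]
  by_cases hneg : nth < 0
  · simp [hneg, show ¬ (0:Int) ≤ nth by omega]
  · have h0 : (0:Int) ≤ nth := by omega
    rw [if_neg hneg, foldl_stepB key nth h0 rows [] (by simp)]
    simp only [List.nil_append, hrev, if_pos h0, Int.sub_zero]
    set L := pvFilt rows key with hL
    set n := nth.toNat with hn
    have hlenTk : (pvTk (n + 1) L).length = L.length - (L.length - (n + 1)) := by
      simp [pvTk]
    by_cases hk : n + 1 ≤ L.length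
    · have hlen : (pvTk (n + 1) L).length = n + 1 := by omega
      have hcond : ((pvTk (n + 1) L).length : Int) = nth + 1 := by
        rw [hlen]; omega
      rw [if_pos hcond]
      have hidx : (pvTk (n + 1) L)[0]? = L[L.length - (n + 1)]? := by
        simp [pvTk, List.getElem?_drop]
      rw [hidx]
      have hrevIdx : L.reverse[n]? = L[L.length - 1 - n]? := by
        rw [List.getElem?_reverse (by omega)]
      rw [hrevIdx]
      congr 1
      omega
    · have hlen : (pvTk (n + 1) L).length = L.length := by omega
      have hcond : ¬ ((pvTk (n + 1) L).length : Int) = nth + 1 := by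
        rw [hlen]; omega
      rw [if_neg hcond]
      apply List.getElem?_eq_none
      simp; omega
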